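-- pv_equiv track=rewrite | github.com/Design-in-Product/weather | noaa_rainfall.py | merge_rainfall_records
-- ===== SOURCE A (Python) =====
-- def merge_rainfall_records(primary: list[dict],
--                            supplement: list[dict]) -> list[dict]:
--     """Merge two record lists, preferring *primary* (NCEI) for any shared date."""
--     primary_dates = {r["date"] for r in primary}
--     merged = list(primary)
--     for r in supplement:
--         if r["date"] not in primary_dates:
--             merged.append(r)
--     merged.sort(key=lambda r: r["date"])
--     return merged
-- ===== SOURCE B (Python) =====
-- def merge_rainfall_records(primary: list[dict],
--                            supplement: list[dict]) -> list[dict]: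
--     """Merge two record lists, preferring *primary* (NCEI) for any shared date.
--
--     Group records into per-date buckets, then emit buckets in sorted-date order.
--     """
--     buckets = {}
--     for r in primary:
--         buckets.setdefault(r["date"], []).append(r)
--     primary_dates = set(buckets)
--     for r in supplement:
--         if r["date"] not in primary_dates:
--             buckets.setdefault(r["date"], []).append(r)
--     merged = []
--     for date in sorted(buckets):
--         merged.extend(buckets[date])
--     return merged
-- ===== Notes on version B (the rewrite author's own statement) =====
-- stated objective: alternative
-- what changed: A builds one flat list (primary plus date-filtered supplement) and stably sorts it by date; B groups records into per-date buckets in a dict and emits the buckets by iterating the distinct dates in sorted order, never sorting the records themselves.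
import Mathlib
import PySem

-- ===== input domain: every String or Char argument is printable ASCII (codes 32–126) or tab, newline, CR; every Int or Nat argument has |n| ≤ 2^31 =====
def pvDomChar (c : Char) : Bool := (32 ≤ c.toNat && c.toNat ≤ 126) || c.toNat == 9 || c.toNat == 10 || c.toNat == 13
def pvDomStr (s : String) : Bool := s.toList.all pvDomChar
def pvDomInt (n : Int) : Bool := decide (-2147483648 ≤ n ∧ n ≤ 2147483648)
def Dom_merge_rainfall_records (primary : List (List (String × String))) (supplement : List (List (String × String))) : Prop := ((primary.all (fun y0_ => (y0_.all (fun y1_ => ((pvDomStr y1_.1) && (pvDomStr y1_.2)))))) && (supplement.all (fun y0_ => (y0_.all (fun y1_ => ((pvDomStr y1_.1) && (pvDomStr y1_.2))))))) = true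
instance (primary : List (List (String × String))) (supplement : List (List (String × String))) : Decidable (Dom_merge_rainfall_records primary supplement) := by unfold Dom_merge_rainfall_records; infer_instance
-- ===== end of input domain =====

-- B replaces A's flat filter-then-stable-sort with per-date buckets emitted by iterating the sorted distinct dates (alternative decomposition, same cost).

-- ===== PORT A =====
-- r["date"]: first-match dict lookup; total form of Python's d[k], exact under Pre_ (records without a "date" key — KeyError — are excluded there)
def pvDate (r : List (String × String)) : String :=
  (PySem.Dict.mk r).getD "date" ""

def merge_rainfall_records (primary : List (List (String × String))) (supplement : List (List (String × String))) : List (List (String × String)) :=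
  let primary_dates : PySem.Set String := PySem.Set.ofList (primary.map (fun r => pvDate r))
  let merged := supplement.foldl
    (fun acc r => if !(PySem.Set.contains primary_dates (pvDate r)) then acc ++ [r] else acc) primary
  PySem.List.sorted merged (fun r => pvDate r) false

-- ===== PORT B =====
def merge_rainfall_records_alt (primary : List (List (String × String))) (supplement : List (List (String × String))) : List (List (String × String)) :=
  -- buckets.setdefault(r["date"], []).append(r)  ==  modify (pvDate r) [] (· ++ [r])
  let buckets0 := primary.foldl (fun d r => d.modify (pvDate r) [] (fun b => b ++ [r])) PySem.Dict.empty
  let primary_dates : PySem.Set String := PySem.Set.ofList buckets0.keys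
  let buckets := supplement.foldl
    (fun d r => if !(PySem.Set.contains primary_dates (pvDate r)) then d.modify (pvDate r) [] (fun b => b ++ [r]) else d) buckets0
  -- buckets[date] for date in sorted(buckets): date is always a key, so getD is exact
  (PySem.List.sorted buckets.keys (fun k => k) false).foldl (fun acc k => acc ++ buckets.getD k []) []

-- ===== PRECONDITION & SPEC =====
-- Pre_ excludes exactly the records without a "date" key, on which Python's r["date"] raises KeyError.
def Pre_merge_rainfall_records (primary : List (List (String × String))) (supplement : List (List (String × String))) : Prop :=
  ∀ r ∈ primary ++ supplement, (PySem.Dict.mk r).contains "date" = true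
instance (primary : List (List (String × String))) (supplement : List (List (String × String))) : Decidable (Pre_merge_rainfall_records primary supplement) := by unfold Pre_merge_rainfall_records; infer_instance

def pvWitness_merge_rainfall_records : (List (List (String × String))) × (List (List (String × String))) :=
  ([[("date", "2024-01-02"), ("prcp", "3")]], [[("date", "2024-01-01"), ("prcp", "7")]])

def Spec_merge_rainfall_records (primary : List (List (String × String))) (supplement : List (List (String × String))) (out : List (List (String × String))) : Prop := out = merge_rainfall_records_alt primary supplement
instance (primary : List (List (String × String))) (supplement : List (List (String × String))) (out : List (List (String × String))) : Decidable (Spec_merge_rainfall_records primary supplement out) := by unfold Spec_merge_rainfall_records; infer_instance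

-- ===== CLAIM (what is proved, stated in full; the proofs are below) =====
def Claim_equal_merge_rainfall_records : Prop := ∀ (primary : List (List (String × String))) (supplement : List (List (String × String))), Dom_merge_rainfall_records primary supplement → Pre_merge_rainfall_records primary supplement → Spec_merge_rainfall_records primary supplement (merge_rainfall_records primary supplement)

-- ===== LEMMAS AND PROOFS =====

-- insert a new key into a strictly sorted key list (proof-side description of where sorted() puts a fresh date)
def insKey (c : String) : List String → List String
  | [] => [c]
  | k :: t => if c = k then k :: t else if c < k then c :: k :: t else k :: insKey c t

-- the sorted distinct dates of a record list
def sortedKeys (l : List (List (String × String))) : List String :=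
  PySem.List.sorted (PySem.Set.ofList (l.map (fun r => pvDate r))) (fun k => k) false

lemma mem_insKey {y c : String} {ks : List String} :
    y ∈ insKey c ks ↔ y = c ∨ y ∈ ks := by
  induction ks with
  | nil => simp [insKey]
  | cons k t ih =>
    by_cases hck : c = k
    · subst hck; simp [insKey]
    · by_cases hlt : c < k
      · simp [insKey, hck, hlt]
      · simp [insKey, hck, hlt, ih]; tauto

lemma insKey_of_mem {c : String} {ks : List String} (hp : ks.Pairwise (· < ·)) (h : c ∈ ks) :
    insKey c ks = ks := by
  induction ks with
  | nil => cases h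
  | cons k t ih =>
    rcases List.mem_cons.mp h with hck | hct
    · simp [insKey, hck]
    · have hk : k < c := (List.pairwise_cons.mp hp).1 c hct
      simp [insKey, (ne_of_gt hk), not_lt.mpr (le_of_lt hk),
        ih (List.pairwise_cons.mp hp).2 hct]

lemma insKey_perm {c : String} {ks : List String} (h : c ∉ ks) :
    (insKey c ks).Perm (ks ++ [c]) := by
  induction ks with
  | nil => simp [insKey]
  | cons k t ih =>
    simp only [List.mem_cons, not_or] at h
    by_cases hlt : c < k
    · simp only [insKey, h.1, if_false, hlt, if_true]
      exact (List.perm_append_singleton c (k :: t)).symm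
    · simp only [insKey, h.1, if_false, hlt]
      exact (ih h.2).cons k

lemma insKey_pairwise {c : String} {ks : List String} (h : ks.Pairwise (· < ·)) :
    (insKey c ks).Pairwise (· < ·) := by
  induction ks with
  | nil => simp [insKey]
  | cons k t ih =>
    obtain ⟨hk, ht⟩ := List.pairwise_cons.mp h
    by_cases hck : c = k
    · simpa [insKey, hck] using h
    · by_cases hlt : c < k
      · simp only [insKey, hck, if_false, hlt, if_true]
        refine List.pairwise_cons.mpr ⟨?_, h⟩
        intro y hy
        rcases List.mem_cons.mp hy with rfl | hyt
        · exact hlt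
        · exact lt_trans hlt (hk y hyt)
      · have hkc : k < c := lt_of_le_of_ne (not_lt.mp hlt) (Ne.symm hck)
        simp only [insKey, hck, if_false, hlt]
        refine List.pairwise_cons.mpr ⟨?_, ih ht⟩
        intro y hy
        rcases mem_insKey.mp hy with rfl | hyt
        · exact hkc
        · exact hk y hyt

lemma sortedKeys_append_singleton (l : List (List (String × String))) (x : List (String × String)) :
    sortedKeys (l ++ [x]) = insKey (pvDate x) (sortedKeys l) := by
  unfold sortedKeys
  rw [List.map_append, PySem.Set.ofList_eq_foldl, List.foldl_append,
    ← PySem.Set.ofList_eq_foldl]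
  simp only [List.map_cons, List.map_nil, List.foldl_cons, List.foldl_nil]
  by_cases hmem : pvDate x ∈ PySem.Set.ofList (l.map (fun r => pvDate r))
  · rw [PySem.Set.add_of_mem hmem,
      insKey_of_mem (PySem.List.sorted_ofList_pairwise_lt _)
        ((PySem.List.mem_sorted _ _ _ _).mpr hmem)]
  · rw [PySem.Set.add_of_not_mem hmem]
    refine PySem.List.sorted_eq_of_perm_of_pairwise_lt _ _ _ ?_ ?_
    · refine (insKey_perm ?_).trans ?_
      · exact fun hc => hmem ((PySem.List.mem_sorted _ _ _ _).mp hc)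
      · exact (PySem.List.sorted_perm _ _ _).append_right [pvDate x]
    · exact insKey_pairwise (PySem.List.sorted_ofList_pairwise_lt _)

lemma insertBy_cons {α : Type} (before : α → α → Bool) (x y : α) (ys : List α) :
    PySem.List.insertBy before x (y :: ys)
      = if before x y then x :: y :: ys else y :: PySem.List.insertBy before x ys := rfl

lemma insertBy_forall_before {α : Type} (before : α → α → Bool) (x : α) (ys : List α)
    (h : ∀ y ∈ ys, before x y = true) : PySem.List.insertBy before x ys = x :: ys := by
  cases ys with
  | nil => rfl
  | cons y t => rw [insertBy_cons, if_pos (h y (List.mem_cons_self ..))]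

lemma insertBy_append_not_before {α : Type} (before : α → α → Bool) (x : α) (as bs : List α)
    (h : ∀ a ∈ as, before x a = false) :
    PySem.List.insertBy before x (as ++ bs) = as ++ PySem.List.insertBy before x bs := by
  induction as with
  | nil => rfl
  | cons a t ih =>
    rw [List.cons_append, insertBy_cons,
      if_neg (by simp [h a (List.mem_cons_self ..)]),
      ih (fun a ha => h a (List.mem_cons_of_mem _ ha)), List.cons_append]

-- inserting a record into a date-grouped concatenation lands at the end of its date's bucket
lemma insertBy_flatMap (ks : List String) (buck : String → List (List (String × String)))
    (x : List (String × String))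
    (hp : ks.Pairwise (· < ·))
    (hk : ∀ k ∈ ks, ∀ r ∈ buck k, pvDate r = k)
    (habs : pvDate x ∉ ks → buck (pvDate x) = []) :
    PySem.List.insertBy (fun a b => decide (pvDate a < pvDate b)) x (ks.flatMap buck)
      = (insKey (pvDate x) ks).flatMap (fun k => buck k ++ if pvDate x == k then [x] else []) := by
  induction ks with
  | nil =>
    simp only [List.flatMap_nil, insKey, List.flatMap_cons, List.flatMap_nil,
      habs (List.not_mem_nil), beq_self_eq_true, if_true]
    rfl
  | cons k t ih =>
    obtain ⟨hkt, hpt⟩ := List.pairwise_cons.mp hp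
    by_cases hck : pvDate x = k
    · rw [List.flatMap_cons,
        insertBy_append_not_before _ _ _ _
          (fun a ha => by simp [hk k (List.mem_cons_self ..) a ha, hck]),
        insertBy_forall_before _ _ _ (fun y hy => by
          obtain ⟨k', hk', hyk'⟩ := List.mem_flatMap.mp hy
          simp [hk k' (List.mem_cons_of_mem _ hk') y hyk', hck, hkt k' hk'])]
      have hgt : List.flatMap (fun k' => buck k' ++ if pvDate x == k' then [x] else []) t
          = List.flatMap buck t := by
        refine List.flatMap_congr (fun k' hk' => ?_)
        have hne : (pvDate x == k') = false := by
          simp [hck, ne_of_lt (hkt k' hk')]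
        rw [hne]; simp
      rw [insKey_of_mem hp (by simp [hck]), List.flatMap_cons, hgt]
      simp [hck, List.append_assoc]
    · by_cases hlt : pvDate x < k
      · have hnot : pvDate x ∉ k :: t := by
          simp only [List.mem_cons, not_or]
          exact ⟨hck, fun hct => absurd (hkt _ hct) (not_lt.mpr (le_of_lt hlt))⟩
        rw [insertBy_forall_before _ _ _ (fun y hy => by
          obtain ⟨k', hk', hyk'⟩ := List.mem_flatMap.mp hy
          have hky : pvDate x < k' := by
            rcases List.mem_cons.mp hk' with rfl | h'
            · exact hlt
            · exact lt_trans hlt (hkt _ h')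
          simp [hk k' hk' y hyk', hky])]
        have hgt : List.flatMap (fun k' => buck k' ++ if pvDate x == k' then [x] else []) t
            = List.flatMap buck t := by
          refine List.flatMap_congr (fun k' hk' => ?_)
          have hne : (pvDate x == k') = false := by
            simp only [beq_eq_false_iff_ne, ne_eq]
            intro h; exact hnot (h ▸ List.mem_cons_of_mem _ hk')
          rw [hne]; simp
        simp only [show insKey (pvDate x) (k :: t) = pvDate x :: k :: t by
              simp [insKey, hck, hlt],
          List.flatMap_cons, hgt, habs hnot]
        simp [hck]
      · have hkc : k < pvDate x := lt_of_le_of_ne (not_lt.mp hlt) (Ne.symm hck)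
        rw [List.flatMap_cons,
          insertBy_append_not_before _ _ _ _
            (fun a ha => by simp [hk k (List.mem_cons_self ..) a ha, not_lt.mpr (le_of_lt hkc)]),
          ih hpt (fun k' h' => hk k' (List.mem_cons_of_mem _ h'))
            (fun hnt => habs (by simp [List.mem_cons, hck, hnt])),
          show insKey (pvDate x) (k :: t) = k :: insKey (pvDate x) t by
            simp [insKey, hck, hlt],
          List.flatMap_cons,
          show (pvDate x == k) = false by simp [hck]]
        simp

-- a stable sort by date IS the concatenation of the per-date buckets over the sorted distinct dates
lemma sorted_eq_groups (l : List (List (String × String))) :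
    PySem.List.sorted l (fun r => pvDate r) false
      = (sortedKeys l).flatMap (fun k => l.filter (fun r => pvDate r == k)) := by
  induction l using List.reverseRecOn with
  | nil => rfl
  | append_singleton l x ih =>
    have h1 : (sortedKeys l).Pairwise (· < ·) := by
      unfold sortedKeys
      exact PySem.List.sorted_ofList_pairwise_lt _
    have h2 : ∀ k ∈ sortedKeys l, ∀ r ∈ l.filter (fun r => pvDate r == k), pvDate r = k := by
      intro k _ r hr
      simpa using (List.mem_filter.mp hr).2
    have h3 : pvDate x ∉ sortedKeys l → l.filter (fun r => pvDate r == pvDate x) = [] := by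
      intro hnot
      rw [List.filter_eq_nil_iff]
      intro r hr hbeq
      apply hnot
      unfold sortedKeys
      exact (PySem.List.mem_sorted _ _ _ _).mpr
        ((PySem.Set.mem_ofList _ _).mpr (List.mem_map.mpr ⟨r, hr, by simpa using hbeq⟩))
    have hins := insertBy_flatMap (sortedKeys l) (fun k => l.filter (fun r => pvDate r == k)) x
      h1 h2 h3
    rw [PySem.List.sorted_eq_foldl_insertBy, List.foldl_append, List.foldl_cons, List.foldl_nil,
      ← PySem.List.sorted_eq_foldl_insertBy, ih, hins, sortedKeys_append_singleton]
    refine List.flatMap_congr (fun k _ => ?_)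
    by_cases h : pvDate x = k
    · simp [List.filter_append, List.filter, h]
    · have hb : (pvDate x == k) = false := by simp [h]
      simp [List.filter_append, List.filter, hb]

-- the bucket dict built by the modify-fold reads back as a filter
lemma getD_buckets (l : List (List (String × String))) (d : PySem.Dict String (List (List (String × String)))) (c : String) :
    (l.foldl (fun d r => d.modify (pvDate r) [] (fun b => b ++ [r])) d).getD c []
      = d.getD c [] ++ l.filter (fun r => pvDate r == c) := by
  have h := PySem.Dict.getD_foldl_modify_append (l.map (fun r => (pvDate r, r))) d c
  rw [List.foldl_map] at h
  simpa [Function.comp_def, List.filter_map] using h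

lemma keys_buckets (l : List (List (String × String))) :
    (l.foldl (fun d r => d.modify (pvDate r) [] (fun b => b ++ [r])) PySem.Dict.empty).keys
      = PySem.Set.ofList (l.map (fun r => pvDate r)) := by
  have h := PySem.Dict.keys_foldl_modify_key l (fun r => pvDate r) []
    (fun _ r => fun b => b ++ [r]) PySem.Dict.empty
  rw [h, PySem.Dict.keys_empty, PySem.Set.ofList_eq_foldl]
  rfl

lemma contains_congr {s t : List String} (h : ∀ y, y ∈ s ↔ y ∈ t) (x : String) :
    PySem.Set.contains s x = PySem.Set.contains t x := by
  simp [PySem.Set.contains, h]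

-- ===== VERDICT (by name: the statement is the Claim_ definition above) =====
theorem merge_rainfall_records_spec : Claim_equal_merge_rainfall_records := by
  intro p s _ _
  unfold Spec_merge_rainfall_records
  dsimp only [merge_rainfall_records, merge_rainfall_records_alt]
  -- A's append loop is primary ++ (supplement filtered on fresh dates)
  have hA : s.foldl (fun acc r =>
        if !(PySem.Set.contains (PySem.Set.ofList (p.map (fun r => pvDate r))) (pvDate r))
        then acc ++ [r] else acc) p
      = p ++ s.filter (fun r =>
          !(PySem.Set.contains (PySem.Set.ofList (p.map (fun r => pvDate r))) (pvDate r))) := by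
    simpa using PySem.List.foldl_append_if
      (fun r => !(PySem.Set.contains (PySem.Set.ofList (p.map (fun r => pvDate r))) (pvDate r)))
      (fun r => r) s p
  rw [hA]
  -- B's second loop tests the same date set as A
  have hcont : ∀ y, PySem.Set.contains
      (PySem.Set.ofList
        (p.foldl (fun d r => d.modify (pvDate r) [] (fun b => b ++ [r])) PySem.Dict.empty).keys) y
      = PySem.Set.contains (PySem.Set.ofList (p.map (fun r => pvDate r))) y := by
    intro y
    rw [keys_buckets]
    exact contains_congr (fun z => PySem.Set.mem_ofList _ z) y
  simp only [hcont]
  -- B's two bucket loops are one bucket loop over A's merged list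
  have hB : s.foldl (fun d r =>
        if !(PySem.Set.contains (PySem.Set.ofList (p.map (fun r => pvDate r))) (pvDate r))
        then d.modify (pvDate r) [] (fun b => b ++ [r]) else d)
        (p.foldl (fun d r => d.modify (pvDate r) [] (fun b => b ++ [r])) PySem.Dict.empty)
      = (p ++ s.filter (fun r =>
          !(PySem.Set.contains (PySem.Set.ofList (p.map (fun r => pvDate r))) (pvDate r)))).foldl
          (fun d r => d.modify (pvDate r) [] (fun b => b ++ [r])) PySem.Dict.empty := by
    rw [List.foldl_append]
    exact (List.foldl_filter).symm
  rw [hB]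
  -- emit the buckets: foldl-append is flatMap over the sorted distinct dates
  rw [PySem.List.foldl_append_eq_flatMap, List.nil_append, keys_buckets, sorted_eq_groups]
  unfold sortedKeys
  refine List.flatMap_congr (fun k _ => ?_)
  rw [getD_buckets, PySem.Dict.getD_empty, List.nil_append]
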